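-- pv_equiv track=rewrite | github.com/DmitryBozhko/CPU-Design-and-Simulation-Project | src/numeric_core/twos_complement.py | _reorder_little_endian_word
-- ===== SOURCE A (Python) =====
-- def _normalize_slice(bits: list[int], width: int) -> list[int]:
--     normalized: list[int] = []
--     it = iter(bits)
--     for _ in range(width):
--         try:
--             value = next(it)
--         except StopIteration:
--             value = 0
--         normalized.append(value & 1)
--     return normalized
--
-- def _reorder_little_endian_word(bits32: list[int]) -> list[int]:
--     normalized = _normalize_slice(bits32, 32)
--     nibbles: list[list[int]] = []
--     it = iter(normalized)
--     for _ in range(8):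
--         nibble: list[int] = []
--         for _ in range(4):
--             try:
--                 bit = next(it)
--             except StopIteration:
--                 bit = 0
--             nibble.append(bit & 1)
--         nibbles.append(nibble)
--     nibbles.reverse()
--     reordered: list[int] = []
--     for nibble in nibbles:
--         for bit in nibble:
--             reordered.append(bit & 1)
--     return reordered
-- ===== SOURCE B (Python) =====
-- def _reorder_little_endian_word(bits32: list[int]) -> list[int]:
--     norm = [(bits32[i] & 1) if i < len(bits32) else 0 for i in range(32)]
--     return [norm[4 * (7 - k // 4) + k % 4] for k in range(32)]
-- ===== Notes on version B (the rewrite author's own statement) =====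
-- stated objective: simpler
-- what changed: Replaces the iterator-driven normalize loop, the nibble list-of-lists with reverse() and the nested flatten loop by two flat comprehensions using direct index arithmetic out[k] = norm[4*(7 - k//4) + k%4].
import Mathlib
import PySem

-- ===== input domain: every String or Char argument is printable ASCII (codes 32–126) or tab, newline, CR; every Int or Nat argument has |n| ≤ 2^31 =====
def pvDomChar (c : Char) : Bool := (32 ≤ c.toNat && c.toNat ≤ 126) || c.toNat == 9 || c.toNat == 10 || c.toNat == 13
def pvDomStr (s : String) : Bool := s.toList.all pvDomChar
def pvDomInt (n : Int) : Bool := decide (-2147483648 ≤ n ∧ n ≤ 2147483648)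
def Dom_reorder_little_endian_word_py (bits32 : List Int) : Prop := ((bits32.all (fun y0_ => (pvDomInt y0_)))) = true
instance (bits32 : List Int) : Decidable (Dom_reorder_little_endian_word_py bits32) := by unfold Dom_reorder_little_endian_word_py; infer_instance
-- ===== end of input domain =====

-- ===== PORT A =====
-- B changes: builds the output by direct index arithmetic in two comprehensions, eliminating
-- the nibble list-of-lists, the reverse() and the nested flatten loop (objective: simpler).
-- Port note: Python's `v & 1` on an int equals `v % 2` (floor mod, nonneg result),
-- ported exactly as PySem.Int.mod v 2.

-- _normalize_slice: consumes the iterator over `bits` for `width` steps, 0 after exhaustion;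
-- the loop appends in order, so structural recursion building the list front-to-back is exact.
def pvNormalize : List Int → Nat → List Int
  | _, 0 => []
  | [], w + 1 => PySem.Int.mod 0 2 :: pvNormalize [] w
  | b :: rest, w + 1 => PySem.Int.mod b 2 :: pvNormalize rest w

-- inner `for _ in range(4)` loop: returns (nibble, remaining iterator)
def pvTakeNibble : Nat → List Int → List Int × List Int
  | 0, it => ([], it)
  | n + 1, [] =>
      let p := pvTakeNibble n []
      (PySem.Int.mod 0 2 :: p.1, p.2)
  | n + 1, b :: it =>
      let p := pvTakeNibble n it
      (PySem.Int.mod b 2 :: p.1, p.2)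

-- outer `for _ in range(8)` loop building `nibbles`
def pvNibbles : Nat → List Int → List (List Int)
  | 0, _ => []
  | n + 1, it =>
      let p := pvTakeNibble 4 it
      p.1 :: pvNibbles n p.2

def reorder_little_endian_word_py (bits32 : List Int) : List Int :=
  let normalized := pvNormalize bits32 32
  let nibbles := (pvNibbles 8 normalized).reverse
  nibbles.foldl (fun acc nib => acc ++ nib.map (fun b => PySem.Int.mod b 2)) []

-- ===== PORT B =====
-- Source B: two comprehensions; `bits32[i]` is only evaluated when i < len, so getD is exact;
-- `k // 4` and `k % 4` on nonnegative k are Nat `/` and `%`; norm's index is always in [0,32),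
-- so getD is exact there too.
def reorder_little_endian_word_py_alt (bits32 : List Int) : List Int :=
  let norm := (List.range 32).map (fun i =>
    if i < bits32.length then PySem.Int.mod (bits32.getD i 0) 2 else 0)
  (List.range 32).map (fun k => norm.getD (4 * (7 - k / 4) + k % 4) 0)
-- ===== PRECONDITION & SPEC =====
def Spec_reorder_little_endian_word_py (bits32 : List Int) (out : List Int) : Prop := out = reorder_little_endian_word_py_alt bits32
instance (bits32 : List Int) (out : List Int) : Decidable (Spec_reorder_little_endian_word_py bits32 out) := by unfold Spec_reorder_little_endian_word_py; infer_instance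

-- ===== CLAIM (what is proved, stated in full; the proofs are below) =====
def Claim_equal_reorder_little_endian_word_py : Prop := ∀ (bits32 : List Int), Dom_reorder_little_endian_word_py bits32 → Spec_reorder_little_endian_word_py bits32 (reorder_little_endian_word_py bits32)

-- ===== LEMMAS AND PROOFS =====

-- helper abbreviations used only in proof statements
def pvG (bits : List Int) (i : Nat) : Int := bits.getD i 0
def pvM (x : Int) : Int := PySem.Int.mod x 2
def pvC (bits : List Int) (i : Nat) : Int :=
  if i < bits.length then pvM (pvG bits i) else 0

theorem pvNormalize_eq (w : Nat) : ∀ bits : List Int,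
    pvNormalize bits w = (List.range w).map (fun i => pvM (pvG bits i)) := by
  induction w with
  | zero => intro bits; rfl
  | succ w ih =>
      intro bits
      rw [List.range_succ_eq_map, List.map_cons, List.map_map]
      cases bits with
      | nil =>
          show PySem.Int.mod 0 2 :: pvNormalize [] w = _
          rw [ih []]
          simp [pvG, pvM, Function.comp_def, PySem.Int.mod]
      | cons b rest =>
          show PySem.Int.mod b 2 :: pvNormalize rest w = _
          rw [ih rest]
          simp [pvG, pvM, Function.comp_def]

theorem pvM_idem (x : Int) : pvM (pvM x) = pvM x := by
  unfold pvM
  rcases PySem.Int.mod_two_eq x with h | h <;> rw [h] <;> decide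

theorem pvElt (bits : List Int) (i : Nat) :
    pvM (pvM (pvG bits i)) = pvC bits i := by
  rw [pvM_idem, pvC]
  split_ifs with h
  · rfl
  · rw [pvG, List.getD_eq_default _ _ (by omega)]
    rfl

theorem pvA_explicit (bits : List Int) :
    reorder_little_endian_word_py bits = [pvM (pvM (pvG bits 28)), pvM (pvM (pvG bits 29)), pvM (pvM (pvG bits 30)), pvM (pvM (pvG bits 31)), pvM (pvM (pvG bits 24)), pvM (pvM (pvG bits 25)), pvM (pvM (pvG bits 26)), pvM (pvM (pvG bits 27)), pvM (pvM (pvG bits 20)), pvM (pvM (pvG bits 21)), pvM (pvM (pvG bits 22)), pvM (pvM (pvG bits 23)), pvM (pvM (pvG bits 16)), pvM (pvM (pvG bits 17)), pvM (pvM (pvG bits 18)), pvM (pvM (pvG bits 19)), pvM (pvM (pvG bits 12)), pvM (pvM (pvG bits 13)), pvM (pvM (pvG bits 14)), pvM (pvM (pvG bits 15)), pvM (pvM (pvG bits 8)), pvM (pvM (pvG bits 9)), pvM (pvM (pvG bits 10)), pvM (pvM (pvG bits 11)), pvM (pvM (pvG bits 4)), pvM (pvM (pvG bits 5)), pvM (pvM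 (pvG bits 6)), pvM (pvM (pvG bits 7)), pvM (pvM (pvG bits 0)), pvM (pvM (pvG bits 1)), pvM (pvM (pvG bits 2)), pvM (pvM (pvG bits 3))] := by
  unfold reorder_little_endian_word_py
  rw [pvNormalize_eq]
  simp [List.range_succ, pvNibbles, pvTakeNibble, pvM, pvG]

theorem pvB_explicit (bits : List Int) :
    reorder_little_endian_word_py_alt bits = [pvC bits 28, pvC bits 29, pvC bits 30, pvC bits 31, pvC bits 24, pvC bits 25, pvC bits 26, pvC bits 27, pvC bits 20, pvC bits 21, pvC bits 22, pvC bits 23, pvC bits 16, pvC bits 17, pvC bits 18, pvC bits 19, pvC bits 12, pvC bits 13, pvC bits 14, pvC bits 15, pvC bits 8, pvC bits 9, pvC bits 10, pvC bits 11, pvC bits 4, pvC bits 5, pvC bits 6, pvC bits 7, pvC bits 0, pvC bits 1, pvC bits 2, pvC bits 3] := by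
  unfold reorder_little_endian_word_py_alt
  simp [List.range_succ, pvC, pvM, pvG]

-- ===== VERDICT (by name: the statement is the Claim_ definition above) =====
theorem reorder_little_endian_word_py_spec : Claim_equal_reorder_little_endian_word_py := by
  intro bits _
  unfold Spec_reorder_little_endian_word_py
  rw [pvA_explicit, pvB_explicit]
  simp only [pvElt]
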